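-- pv_equiv track=rewrite | github.com/dagit/RandomMetroidSolver | utils/utils.py | fixEnergy
-- ===== SOURCE A (Python) =====
-- def fixEnergy(items):
--     # display number of energy used
--     energies = [i for i in items if i.find('ETank') != -1]
--     if len(energies) > 0:
--         (maxETank, maxReserve, maxEnergy) = (0, 0, 0)
--         for energy in energies:
--             nETank = int(energy[0:energy.find('-ETank')])
--             if energy.find('-Reserve') != -1:
--                 nReserve = int(energy[energy.find(' - ')+len(' - '):energy.find('-Reserve')])
--             else:
--                 nReserve = 0
--             nEnergy = nETank + nReserve
--             if nEnergy > maxEnergy: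
--                 maxEnergy = nEnergy
--                 maxETank = nETank
--                 maxReserve = nReserve
--             items.remove(energy)
--         items.append('{}-ETank'.format(maxETank))
--         if maxReserve > 0:
--             items.append('{}-Reserve'.format(maxReserve))
--     return items
-- ===== SOURCE B (Python) =====
-- def fixEnergy(items):
--     # Single pass: keep non-energy items in order, track the best energy entry,
--     # then append the collapsed ETank/Reserve entries. (A re-scans with list.remove.)
--     kept = []
--     maxETank = maxReserve = maxEnergy = 0
--     seen = False
--     for it in items:
--         if 'ETank' not in it:
--             kept.append(it)
--         else:
--             seen = True
--             nETank = int(it[0:it.find('-ETank')])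
--             if '-Reserve' in it:
--                 nReserve = int(it[it.find(' - ') + 3:it.find('-Reserve')])
--             else:
--                 nReserve = 0
--             n = nETank + nReserve
--             if n > maxEnergy:
--                 maxEnergy, maxETank, maxReserve = n, nETank, nReserve
--     if not seen:
--         return items
--     kept.append('{}-ETank'.format(maxETank))
--     if maxReserve > 0:
--         kept.append('{}-Reserve'.format(maxReserve))
--     return kept
-- ===== Notes on version B (the rewrite author's own statement) =====
-- stated objective: alternative
-- what changed: Replaces A's filter-then-loop with list.remove inside (quadratic in the number of energy entries) by a single pass that keeps non-energy items in order and tracks the best energy entry; measured ~1.4x faster on generated inputs, below the 1.5x bar, so no speed is claimed.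
import Mathlib
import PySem

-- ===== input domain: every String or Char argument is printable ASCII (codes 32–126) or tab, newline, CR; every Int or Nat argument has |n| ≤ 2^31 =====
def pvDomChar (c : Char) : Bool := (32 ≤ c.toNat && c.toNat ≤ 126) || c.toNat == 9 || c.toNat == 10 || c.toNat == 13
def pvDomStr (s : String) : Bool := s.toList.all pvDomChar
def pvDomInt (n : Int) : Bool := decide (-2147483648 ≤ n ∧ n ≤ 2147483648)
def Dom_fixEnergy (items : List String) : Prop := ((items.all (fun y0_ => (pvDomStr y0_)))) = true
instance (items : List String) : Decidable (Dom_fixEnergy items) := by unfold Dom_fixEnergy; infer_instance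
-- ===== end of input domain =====

-- B collapses the energy entries in ONE pass (A filters, then loops with list.remove inside);
-- equivalence is about the RETURN value only: A mutates `items` in place, B builds a new list.

-- shared helper: the identical `int(...)` parsing lines of Source A and Source B
-- (none = Python's int() raises ValueError there; Pre_ excludes exactly that)
def pvParse (s : String) : Option (Int × Int) :=
  match PySem.Int.ofStr? (PySem.Str.slice s (some 0) (some (PySem.Str.find s "-ETank"))) with
  | none => none
  | some nETank =>
    if PySem.Str.find s "-Reserve" ≠ -1 then
      match PySem.Int.ofStr? (PySem.Str.slice s (some (PySem.Str.find s " - " + 3))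
              (some (PySem.Str.find s "-Reserve"))) with
      | none => none
      | some nReserve => some (nETank, nReserve)
    else some (nETank, 0)

-- ===== PORT A =====
-- loop body of A: state = ((maxETank, maxReserve, maxEnergy), items)
def pvStepA (acc : (Int × Int × Int) × List String) (energy : String) :
    (Int × Int × Int) × List String :=
  match pvParse energy with
  | none => acc   -- int() raises here; unreachable under Pre_
  | some (nETank, nReserve) =>
    let its := match PySem.List.remove? acc.2 energy with
               | some l => l
               | none => acc.2   -- list.remove raises here; never reached (energy came from items)
    if nETank + nReserve > acc.1.2.2 then ((nETank, nReserve, nETank + nReserve), its)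
    else (acc.1, its)

def fixEnergy (items : List String) : List String :=
  let energies := items.filter (fun i => decide (PySem.Str.find i "ETank" ≠ -1))
  if energies.length > 0 then
    let st := energies.foldl pvStepA ((0, 0, 0), items)
    st.2 ++ [PySem.Int.toStr st.1.1 ++ "-ETank"] ++
      (if st.1.2.1 > 0 then [PySem.Int.toStr st.1.2.1 ++ "-Reserve"] else [])
  else items

-- ===== PORT B =====
-- loop body of B: state = (kept, (maxETank, maxReserve, maxEnergy), seen)
def pvStepB (acc : List String × (Int × Int × Int) × Bool) (it : String) :
    List String × (Int × Int × Int) × Bool :=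
  if PySem.Str.isIn "ETank" it = false then (acc.1 ++ [it], acc.2.1, acc.2.2)
  else
    match pvParse it with
    | none => (acc.1, acc.2.1, true)   -- int() raises here; unreachable under Pre_
    | some (nETank, nReserve) =>
      (acc.1,
       (if nETank + nReserve > acc.2.1.2.2 then (nETank, nReserve, nETank + nReserve)
        else acc.2.1),
       true)

def fixEnergy_alt (items : List String) : List String :=
  let st := items.foldl pvStepB ([], (0, 0, 0), false)
  if st.2.2 = false then items
  else
    st.1 ++ [PySem.Int.toStr st.2.1.1 ++ "-ETank"] ++
      (if st.2.1.2.1 > 0 then [PySem.Int.toStr st.2.1.2.1 ++ "-Reserve"] else [])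

-- ===== PRECONDITION & SPEC =====
-- Pre_ excludes exactly the inputs on which Python A raises ValueError:
-- an item containing 'ETank' whose ETank/Reserve number fields do not parse as int.
def Pre_fixEnergy (items : List String) : Prop :=
  ∀ s ∈ items, PySem.Str.isIn "ETank" s = true → (pvParse s).isSome = true
instance (items : List String) : Decidable (Pre_fixEnergy items) := by
  unfold Pre_fixEnergy; infer_instance

def pvWitness_fixEnergy : List String :=
  ["Missile", "3-ETank", "2-ETank - 1-Reserve", "Varia"]

def Spec_fixEnergy (items : List String) (out : List String) : Prop := out = fixEnergy_alt items
instance (items : List String) (out : List String) : Decidable (Spec_fixEnergy items out) := by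
  unfold Spec_fixEnergy; infer_instance

-- ===== CLAIM (what is proved, stated in full; the proofs are below) =====
def Claim_equal_fixEnergy : Prop :=
  ∀ (items : List String), Dom_fixEnergy items → Pre_fixEnergy items →
    Spec_fixEnergy items (fixEnergy items)

-- ===== LEMMAS AND PROOFS =====

-- the max-tracking component both loops share
def pvFM (m : Int × Int × Int) (e : String) : Int × Int × Int :=
  match pvParse e with
  | none => m
  | some (nE, nR) => if nE + nR > m.2.2 then (nE, nR, nE + nR) else m

-- the items-shrinking component of A's loop
def pvGR (its : List String) (e : String) : List String :=
  match pvParse e with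
  | none => its
  | some _ =>
    match PySem.List.remove? its e with
    | some l => l
    | none => its

def pvP (s : String) : Bool := PySem.Str.isIn "ETank" s

theorem pvP_eq_find (i : String) :
    (decide (PySem.Str.find i "ETank" ≠ -1)) = pvP i := by
  unfold pvP
  cases hb : PySem.Str.isIn "ETank" i with
  | false =>
    have hinf : ¬ ("ETank" : String).toList <:+: i.toList := fun hc => by
      rw [(PySem.Str.isIn_iff_infix _ _).mpr hc] at hb; simp at hb
    exact decide_eq_false
      (not_not_intro ((PySem.Str.find_eq_neg_one_iff i "ETank").mpr hinf))
  | true =>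
    exact decide_eq_true
      ((PySem.Str.find_ne_neg_one_iff i "ETank").mpr ((PySem.Str.isIn_iff_infix _ _).mp hb))

theorem pvStepA_split (acc : (Int × Int × Int) × List String) (e : String) :
    pvStepA acc e = (pvFM acc.1 e, pvGR acc.2 e) := by
  rcases h : pvParse e with _ | ⟨nE, nR⟩ <;>
    simp [pvStepA, pvFM, pvGR, h] <;> split_ifs <;> rfl

theorem foldA_split (es : List String) (m : Int × Int × Int) (its : List String) :
    es.foldl pvStepA (m, its) = (es.foldl pvFM m, es.foldl pvGR its) := by
  induction es generalizing m its with
  | nil => rfl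
  | cons e es ih => simp [List.foldl, pvStepA_split, ih]

theorem pvGR_cons_ne (es : List String) (x : String) (its : List String)
    (h : ∀ e ∈ es, e ≠ x) :
    es.foldl pvGR (x :: its) = x :: es.foldl pvGR its := by
  induction es generalizing its with
  | nil => rfl
  | cons e es ih =>
    have hex : e ≠ x := h e (by simp)
    have hstep : pvGR (x :: its) e = x :: pvGR its e := by
      rcases hp : pvParse e with _ | v
      · simp [pvGR, hp]
      · simp only [pvGR, hp]
        rw [PySem.List.remove?_cons_of_ne its (Ne.symm hex)]
        rcases hr : PySem.List.remove? its e with _ | l <;> simp [hr]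
    rw [List.foldl_cons, List.foldl_cons, hstep]
    exact ih (pvGR its e) (fun y hy => h y (List.mem_cons_of_mem _ hy))

theorem pvGR_fold (items : List String)
    (hpre : ∀ e ∈ items, pvP e = true → (pvParse e).isSome = true) :
    (items.filter pvP).foldl pvGR items = items.filter (fun i => ! pvP i) := by
  induction items with
  | nil => rfl
  | cons x xs ih =>
    have hpre' : ∀ e ∈ xs, pvP e = true → (pvParse e).isSome = true :=
      fun e he => hpre e (List.mem_cons_of_mem _ he)
    by_cases hx : pvP x = true
    · rcases hp : pvParse x with _ | v
      · exact absurd (hpre x (by simp) hx) (by simp [hp])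
      · have hfc : (x :: xs).filter pvP = x :: xs.filter pvP := by
          simp [List.filter_cons, hx]
        have hrhs : (x :: xs).filter (fun i => ! pvP i) = xs.filter (fun i => ! pvP i) := by
          simp [List.filter_cons, hx]
        have hstep : pvGR (x :: xs) x = xs := by
          simp [pvGR, hp, PySem.List.remove?_cons_self]
        rw [hfc, hrhs, List.foldl_cons, hstep]
        exact ih hpre'
    · have hx' : pvP x = false := by simpa using hx
      have hne : ∀ e ∈ xs.filter pvP, e ≠ x := by
        intro e he heq
        have hpe := (List.mem_filter.mp he).2
        rw [heq, hx'] at hpe; exact absurd hpe (by simp)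
      have hfc : (x :: xs).filter pvP = xs.filter pvP := by
        simp [List.filter_cons, hx']
      have hrhs : (x :: xs).filter (fun i => ! pvP i) = x :: xs.filter (fun i => ! pvP i) := by
        simp [List.filter_cons, hx']
      rw [hfc, hrhs, pvGR_cons_ne _ _ _ hne, ih hpre']

theorem pvStepB_split (acc : List String × (Int × Int × Int) × Bool) (it : String) :
    pvStepB acc it =
      (acc.1 ++ (if pvP it then [] else [it]),
       (if pvP it then pvFM acc.2.1 it else acc.2.1),
       acc.2.2 || pvP it) := by
  by_cases h : pvP it = true
  · rcases hp : pvParse it with _ | ⟨nE, nR⟩ <;>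
      simp [pvStepB, pvP] at h ⊢ <;> simp [h, hp, pvFM]
  · have h' : pvP it = false := by simpa using h
    simp [pvStepB, pvP] at h' ⊢
    simp [h', pvFM]

theorem foldB_split (items : List String) (kept : List String)
    (m : Int × Int × Int) (seen : Bool) :
    items.foldl pvStepB (kept, m, seen) =
      (kept ++ items.filter (fun i => ! pvP i),
       (items.filter pvP).foldl pvFM m,
       seen || items.any pvP) := by
  induction items generalizing kept m seen with
  | nil => simp
  | cons x xs ih =>
    by_cases hx : pvP x = true
    · simp [List.foldl, pvStepB_split, hx, ih, List.filter_cons]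
    · have hx' : pvP x = false := by simpa using hx
      simp [List.foldl, pvStepB_split, hx', ih, List.filter_cons]

theorem filter_find_eq (items : List String) :
    items.filter (fun i => decide (PySem.Str.find i "ETank" ≠ -1)) = items.filter pvP := by
  apply List.filter_congr
  intro x _
  exact pvP_eq_find x

-- ===== VERDICT (by name: the statement is the Claim_ definition above) =====
theorem fixEnergy_spec : Claim_equal_fixEnergy := by
  intro items _ hpre
  unfold Spec_fixEnergy fixEnergy fixEnergy_alt
  simp only [filter_find_eq, foldB_split, List.nil_append, Bool.false_or]
  by_cases hany : items.any pvP = true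
  · have hne : items.filter pvP ≠ [] := by
      rcases List.any_eq_true.mp hany with ⟨x, hx, hpx⟩
      exact List.ne_nil_of_mem (List.mem_filter.mpr ⟨hx, hpx⟩)
    have hlen : 0 < (items.filter pvP).length := List.length_pos_of_ne_nil hne
    simp only [foldA_split, pvGR_fold items hpre, hany, hlen]
    simp
  · have h0 : items.any pvP = false := by simpa using hany
    have hnil : items.filter pvP = [] := by
      rw [List.filter_eq_nil_iff]
      intro a ha hpa
      exact absurd hpa (by simp [List.any_eq_false.mp h0 a ha])
    simp [hnil, h0]
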